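-- pv_equiv track=rewrite | github.com/fmcooper/matchingproblems | matchingproblems/generator/generator_spa.py | create_project_lecturers
-- ===== SOURCE A (Python) =====
-- def create_project_lecturers(n2, n3):
--     """Returns evenly distributed lecturers for projects.
--
--     Args:
--         n2: The number of projects.
--         n3: The number of lecturers.
--
--     Returns:
--         Evenly distributed lecturers for projects.
--     """
--     num_projects_for_lec_quotient = int(n2 / n3)
--     num_projects_for_lec_remainder = int(n2 % n3)
--
--     num_projects_for_each_lecturer = []
--     for lec_index in range(n3):
--         num_projects_for_each_lecturer.append(num_projects_for_lec_quotient)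
--         if lec_index < num_projects_for_lec_remainder:
--             num_projects_for_each_lecturer[lec_index] += 1
--
--     project_lecturers = []
--     for lec_index in range(n3):
--         num_to_add = num_projects_for_each_lecturer[lec_index]
--         for j in range(num_to_add):
--             project_lecturers.append(lec_index + 1)
--
--     return project_lecturers
-- ===== SOURCE B (Python) =====
-- def create_project_lecturers(n2, n3):
--     """Returns evenly distributed lecturers for projects, computed per index."""
--     if n3 <= 0:
--         return []
--     quotient, remainder = divmod(n2, n3)
--     threshold = remainder * (quotient + 1)
--     return [j // (quotient + 1) + 1 if j < threshold
--             else remainder + (j - threshold) // quotient + 1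
--             for j in range(n2)]
-- ===== Notes on version B (the rewrite author's own statement) =====
-- stated objective: faster
-- what changed: B drops A's per-lecturer counts table and nested expand loop and builds the result in a single pass over the output indices, each element computed by closed-form quotient/remainder index arithmetic (no intermediate list, no per-lecturer inner loop).
-- intended difference: For a negative project count n2 with -n3 < n2 < 0 (n3 >= 1), A's mix of a truncated quotient with a floored remainder makes it return the nonempty list [1, ..., n2+n3]; B returns [], the intended result for a nonpositive number of projects. — e.g. on create_project_lecturers(-1, 2): A returns [1], B returns []
import Mathlib
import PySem

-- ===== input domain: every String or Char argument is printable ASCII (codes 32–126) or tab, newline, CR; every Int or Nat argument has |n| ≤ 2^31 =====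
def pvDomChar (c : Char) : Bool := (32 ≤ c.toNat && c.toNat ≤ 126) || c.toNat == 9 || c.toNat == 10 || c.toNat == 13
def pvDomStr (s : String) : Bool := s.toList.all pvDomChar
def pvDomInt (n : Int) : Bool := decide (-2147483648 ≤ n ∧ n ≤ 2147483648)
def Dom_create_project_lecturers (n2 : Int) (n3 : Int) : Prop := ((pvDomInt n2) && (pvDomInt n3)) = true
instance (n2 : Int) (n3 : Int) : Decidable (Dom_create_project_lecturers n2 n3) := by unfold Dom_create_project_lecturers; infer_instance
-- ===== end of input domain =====

-- B replaces A's per-lecturer counts table and nested expand loop by one pass over the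
-- output indices with closed-form arithmetic (objective: faster; measured).

-- ===== PORT A =====
-- int(n2 / n3) is PySem.Int.truncdiv, exact here since |n2|,|n3| ≤ 2^31 < 2^53 (Dom bound);
-- counts[lec] += 1 / counts[lec] read: the index is always in range, ported with pySetD/pyGetD.
def create_project_lecturers (n2 : Int) (n3 : Int) : List Int :=
  let q := PySem.Int.truncdiv n2 n3
  let r := PySem.Int.mod n2 n3
  let counts := (PySem.List.pyRange 0 n3 1).foldl
    (fun acc lec =>
      let acc := acc ++ [q]
      if lec < r then PySem.List.pySetD acc lec (PySem.List.pyGetD acc lec 0 + 1) else acc) []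
  (PySem.List.pyRange 0 n3 1).foldl
    (fun acc lec =>
      let num := PySem.List.pyGetD counts lec 0
      (PySem.List.pyRange 0 num 1).foldl (fun a _ => a ++ [lec + 1]) acc) []

-- ===== PORT B =====
def create_project_lecturers_alt (n2 : Int) (n3 : Int) : List Int :=
  if n3 ≤ 0 then []
  else
    let q := PySem.Int.floordiv n2 n3
    let r := PySem.Int.mod n2 n3
    let t := r * (q + 1)
    (PySem.List.pyRange 0 n2 1).map (fun j =>
      if j < t then PySem.Int.floordiv j (q + 1) + 1
      else r + PySem.Int.floordiv (j - t) q + 1)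

-- ===== PRECONDITION & SPEC =====
-- Pre_ excludes only n3 = 0, where A raises ZeroDivisionError.
def Pre_create_project_lecturers (n2 : Int) (n3 : Int) : Prop := n3 ≠ 0
instance (n2 : Int) (n3 : Int) : Decidable (Pre_create_project_lecturers n2 n3) := by unfold Pre_create_project_lecturers; infer_instance
def pvWitness_create_project_lecturers : Int × Int := (7, 3)

-- For a negative project count n2 with -n3 < n2 < 0 (n3 ≥ 1), A's mix of a truncated quotient
-- with a floored remainder makes it return the nonempty list [1, …, n2+n3]; B returns [],
-- the intended result for a nonpositive number of projects.
def D_create_project_lecturers (n2 : Int) (n3 : Int) : Prop := 1 ≤ n3 ∧ -n3 < n2 ∧ n2 < 0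
instance (n2 : Int) (n3 : Int) : Decidable (D_create_project_lecturers n2 n3) := by unfold D_create_project_lecturers; infer_instance
def Spec_create_project_lecturers (n2 : Int) (n3 : Int) (out : List Int) : Prop := ¬ D_create_project_lecturers n2 n3 → out = create_project_lecturers_alt n2 n3
instance (n2 : Int) (n3 : Int) (out : List Int) : Decidable (Spec_create_project_lecturers n2 n3 out) := by unfold Spec_create_project_lecturers; infer_instance
def pvDiffWitness_create_project_lecturers : Int × Int := (-1, 2)
def pvDiffWitnessOut_create_project_lecturers : (List Int) × (List Int) := ([1], [])

-- ===== CLAIM (what is proved, stated in full; the proofs are below) =====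
def Claim_unchanged_create_project_lecturers : Prop := ∀ (n2 : Int) (n3 : Int), Dom_create_project_lecturers n2 n3 → Pre_create_project_lecturers n2 n3 → Spec_create_project_lecturers n2 n3 (create_project_lecturers n2 n3)
def Claim_changed_create_project_lecturers : Prop := Dom_create_project_lecturers (pvDiffWitness_create_project_lecturers.1) (pvDiffWitness_create_project_lecturers.2) ∧ Pre_create_project_lecturers (pvDiffWitness_create_project_lecturers.1) (pvDiffWitness_create_project_lecturers.2) ∧ D_create_project_lecturers (pvDiffWitness_create_project_lecturers.1) (pvDiffWitness_create_project_lecturers.2) ∧ create_project_lecturers (pvDiffWitness_create_project_lecturers.1) (pvDiffWitness_create_project_lecturers.2) = pvDiffWitnessOut_create_project_lecturers.1 ∧ create_project_lecturers_alt (pvDiffWitness_create_project_lecturers.1) (pvDiffWitness_create_project_lecturers.2) = pvDiffWitnessOut_create_project_lecturers.2 ∧ pvDiffWitnessOut_create_project_lecturers.1 ≠ pvDiffWitnessOut_create_project_lecturers.2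
def Claim_exact_create_project_lecturers : Prop := ∀ (n2 : Int) (n3 : Int), Dom_create_project_lecturers n2 n3 → Pre_create_project_lecturers n2 n3 → D_create_project_lecturers n2 n3 → create_project_lecturers n2 n3 ≠ create_project_lecturers_alt n2 n3

-- ===== LEMMAS AND PROOFS =====

-- "for j in range(num): append c" adds num copies of c.
theorem pvRepeatFold (c : Int) (l : List Int) (acc : List Int) :
    l.foldl (fun a _ => a ++ [c]) acc = acc ++ List.replicate l.length c := by
  induction l generalizing acc with
  | nil => simp
  | cons x xs ih =>
    rw [List.foldl_cons, ih, List.append_assoc, List.length_cons]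
    simp [List.replicate_succ]

-- appending then bumping the slot just appended.
theorem pvAppendBump (l : List Int) (q : Int) (k : Nat) (h : l.length = k) :
    (l ++ [q]).set k ((l ++ [q]).getD k 0 + 1) = l ++ [q + 1] := by
  subst h
  rw [List.getD_append_right _ _ _ _ (Nat.le_refl _), Nat.sub_self,
    List.set_append_right _ _ (Nat.le_refl _)]
  simp

-- A's counts loop builds the per-lecturer counts table.
theorem pvCountsLoop (q r : Int) (m : Nat) :
    (PySem.List.pyRange 0 (m : Int) 1).foldl
      (fun acc lec =>
        let acc := acc ++ [q]
        if lec < r then PySem.List.pySetD acc lec (PySem.List.pyGetD acc lec 0 + 1) else acc) []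
    = (List.range m).map (fun i : Nat => if (i : Int) < r then q + 1 else q) := by
  induction m with
  | zero => simp [PySem.List.pyRange_one_eq_nil]
  | succ k ih =>
    have h1 : ((k + 1 : Nat) : Int) = (k : Int) + 1 := by push_cast; ring
    rw [h1, PySem.List.pyRange_one_succ_right (by positivity), List.foldl_append, ih,
      List.range_succ, List.map_append]
    simp only [List.foldl_cons, List.foldl_nil, List.map_cons, List.map_nil]
    have hlen : ((List.range k).map (fun i : Nat => if (i : Int) < r then q + 1 else q)).length = k := by
      simp
    by_cases hk : (k : Int) < r
    · simp only [hk, if_true, PySem.List.pySetD_natCast, PySem.List.pyGetD_natCast]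
      rw [pvAppendBump _ _ _ hlen]
    · simp [hk]

-- proof-only views: A's output and B's output over Nat indices.
def pvChunkA (Q R N : Nat) : List Int :=
  (List.range N).flatMap (fun i => List.replicate (if i < R then Q + 1 else Q) ((i : Int) + 1))
def pvChunkB (Q R n2 : Nat) : List Int :=
  (List.range n2).map (fun j =>
    if j < R * (Q + 1) then ((j / (Q + 1) : Nat) : Int) + 1
    else (R : Int) + ((j - R * (Q + 1)) / Q : Nat) + 1)

-- dividing the first k*d naturals by d yields each of 0..k-1 exactly d times, in order.
theorem pvDivChunks (d : Nat) (g : Nat → Int) (k : Nat) :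
    (List.range (k * d)).map (fun j => g (j / d)) =
      (List.range k).flatMap (fun i => List.replicate d (g i)) := by
  induction k with
  | zero => simp
  | succ m ih =>
    rcases Nat.eq_zero_or_pos d with hd | hd
    · simp [hd]
    · rw [Nat.succ_mul, List.range_add, List.map_append, List.map_map, ih, List.range_succ,
        List.flatMap_append]
      congr 1
      have h : ∀ j ∈ List.range d, g ((m * d + j) / d) = g m := by
        intro j hj
        rw [Nat.mul_comm m d, Nat.mul_add_div hd, Nat.div_eq_of_lt (List.mem_range.mp hj)]
        simp
      calc (List.range d).map ((fun j => g (j / d)) ∘ (fun x => m * d + x))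
          = (List.range d).map (fun _ => g m) := List.map_congr_left h
        _ = List.replicate d (g m) := by simp [List.map_const']
        _ = List.flatMap (fun i => List.replicate d (g i)) [m] := by simp

theorem pvChunkEq (Q R M : Nat) :
    pvChunkA Q R (R + M) = pvChunkB Q R (R * (Q + 1) + M * Q) := by
  unfold pvChunkA pvChunkB
  rw [List.range_add, List.flatMap_append, List.flatMap_map,
    List.range_add (n := R * (Q + 1)) (m := M * Q), List.map_append, List.map_map]
  congr 1
  · calc (List.range R).flatMap (fun i => List.replicate (if i < R then Q + 1 else Q) ((i : Int) + 1))
        = (List.range R).flatMap (fun i : Nat => List.replicate (Q + 1) ((i : Int) + 1)) := by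
          apply List.flatMap_congr
          intro i hi
          rw [if_pos (List.mem_range.mp hi)]
      _ = (List.range (R * (Q + 1))).map (fun j => ((fun i : Nat => ((i : Int) + 1)) (j / (Q + 1)))) :=
          (pvDivChunks (Q + 1) (fun i : Nat => (i : Int) + 1) R).symm
      _ = (List.range (R * (Q + 1))).map (fun j =>
            if j < R * (Q + 1) then ((j / (Q + 1) : Nat) : Int) + 1
            else (R : Int) + ((j - R * (Q + 1)) / Q : Nat) + 1) := by
          apply List.map_congr_left
          intro j hj
          rw [if_pos (List.mem_range.mp hj)]
  · calc (List.range M).flatMap (fun i =>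
          List.replicate (if R + i < R then Q + 1 else Q) (((R + i : Nat) : Int) + 1))
        = (List.range M).flatMap (fun i : Nat => List.replicate Q ((R : Int) + (i : Int) + 1)) := by
          apply List.flatMap_congr
          intro i _
          have : ¬ (R + i < R) := by omega
          rw [if_neg this]
          have hc : ((R + i : Nat) : Int) + 1 = (R : Int) + (i : Int) + 1 := by push_cast; ring
          rw [hc]
      _ = (List.range (M * Q)).map (fun j => ((fun i : Nat => (R : Int) + (i : Int) + 1) (j / Q))) :=
          (pvDivChunks Q (fun i : Nat => (R : Int) + (i : Int) + 1) M).symm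
      _ = (List.range (M * Q)).map ((fun j =>
            if j < R * (Q + 1) then ((j / (Q + 1) : Nat) : Int) + 1
            else (R : Int) + ((j - R * (Q + 1)) / Q : Nat) + 1) ∘ (fun x => R * (Q + 1) + x)) := by
          apply List.map_congr_left
          intro j _
          simp only [Function.comp]
          have hnotlt : ¬ (R * (Q + 1) + j < R * (Q + 1)) := by omega
          rw [if_neg hnotlt, Nat.add_sub_cancel_left]

-- A's value at a nonnegative lecturer count, as a flatMap of replicates.
theorem pvPortAChar (n2 : Int) (N : Nat) :
    create_project_lecturers n2 (N : Int) =
      (List.range N).flatMap (fun i : Nat =>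
        List.replicate ((if (i : Int) < PySem.Int.mod n2 (N : Int)
            then PySem.Int.truncdiv n2 (N : Int) + 1
            else PySem.Int.truncdiv n2 (N : Int)).toNat) ((i : Int) + 1)) := by
  simp only [create_project_lecturers]
  rw [pvCountsLoop]
  rw [show PySem.List.pyRange 0 (N : Int) 1 = (List.range N).map (fun k : Nat => (k : Int)) by
    rw [PySem.List.pyRange_one]; simp]
  rw [List.foldl_map]
  rw [PySem.List.foldl_congr_mem (List.range N) _
    (fun acc k => acc ++ List.replicate ((if (k : Int) < PySem.Int.mod n2 (N : Int)
            then PySem.Int.truncdiv n2 (N : Int) + 1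
            else PySem.Int.truncdiv n2 (N : Int)).toNat) ((k : Int) + 1)) []
    (by
      intro acc k hk
      simp only [PySem.List.pyGetD_natCast]
      rw [PySem.List.getD_map_range _ _ _ _ (List.mem_range.mp hk)]
      rw [pvRepeatFold, PySem.List.length_pyRange_one]
      simp)]
  rw [PySem.List.foldl_append_eq_flatMap]
  simp only [List.nil_append]

-- ===== VERDICT (by name: the statement is the Claim_ definition above) =====
-- B's value at a positive lecturer count, as the Nat-indexed chunk map.
theorem pvPortBChar (m N : Nat) (hN : 0 < N) :
    create_project_lecturers_alt (m : Int) (N : Int) = pvChunkB (m / N) (m % N) m := by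
  unfold create_project_lecturers_alt pvChunkB
  rw [if_neg (by exact_mod_cast Nat.not_le.mpr hN)]
  rw [show PySem.List.pyRange 0 (m : Int) 1 = (List.range m).map (fun k : Nat => (k : Int)) by
    rw [PySem.List.pyRange_one]; simp]
  rw [List.map_map]
  apply List.map_congr_left
  intro j hj
  simp only [Function.comp, PySem.Int.floordiv_natCast, PySem.Int.mod_natCast]
  have hT : ((m % N : Nat) : Int) * (((m / N : Nat) : Int) + 1)
      = (((m % N) * (m / N + 1) : Nat) : Int) := by push_cast; ring
  rw [hT]
  by_cases h : j < m % N * (m / N + 1)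
  · rw [if_pos (by exact_mod_cast h), if_pos h]
    rw [show (((m / N : Nat) : Int) + 1) = (((m / N + 1 : Nat)) : Int) by push_cast; ring,
      PySem.Int.floordiv_natCast]
  · rw [if_neg (by exact_mod_cast h), if_neg h]
    rw [show ((j : Int) - (((m % N) * (m / N + 1) : Nat) : Int))
        = (((j - (m % N) * (m / N + 1) : Nat)) : Int) by
      rw [Int.ofNat_sub (Nat.le_of_not_lt h)],
      PySem.Int.floordiv_natCast]

theorem create_project_lecturers_spec : Claim_unchanged_create_project_lecturers := by
  intro n2 n3 _ hpre hnD
  rcases lt_trichotomy n3 0 with hneg | hzero | hpos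
  · -- n3 < 0 : both sides are []
    have hA : create_project_lecturers n2 n3 = [] := by
      simp [create_project_lecturers, PySem.List.pyRange_one_eq_nil (le_of_lt hneg)]
    have hB : create_project_lecturers_alt n2 n3 = [] := by
      simp [create_project_lecturers_alt, le_of_lt hneg]
    rw [hA, hB]
  · exact absurd hzero hpre
  · obtain ⟨N, rfl⟩ : ∃ N : Nat, n3 = (N : Int) :=
      ⟨n3.toNat, (Int.toNat_of_nonneg (le_of_lt hpos)).symm⟩
    have hN : 0 < N := by exact_mod_cast hpos
    by_cases hn2 : 0 ≤ n2
    · -- the ordinary case: n2 ≥ 0, n3 ≥ 1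
      obtain ⟨m, rfl⟩ : ∃ m : Nat, n2 = (m : Int) :=
        ⟨n2.toNat, (Int.toNat_of_nonneg hn2).symm⟩
      have hq : PySem.Int.truncdiv (m : Int) (N : Int) = ((m / N : Nat) : Int) := by
        simp only [PySem.Int.truncdiv]
        exact (Int.ofNat_tdiv m N).symm
      have hr : PySem.Int.mod (m : Int) (N : Int) = ((m % N : Nat) : Int) :=
        PySem.Int.mod_natCast m N
      have hA : create_project_lecturers (m : Int) (N : Int) = pvChunkA (m / N) (m % N) N := by
        rw [pvPortAChar]
        unfold pvChunkA
        apply List.flatMap_congr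
        intro i _
        rw [hq, hr]
        by_cases h : i < m % N
        · rw [if_pos (by exact_mod_cast h), if_pos h]
          congr 1
        · rw [if_neg (by exact_mod_cast h), if_neg h]
          congr 1
      rw [hA, pvPortBChar m N hN]
      obtain ⟨M, hM⟩ : ∃ M : Nat, N = m % N + M :=
        ⟨N - m % N, by have := Nat.mod_lt m hN; omega⟩
      have hm : m = m % N * (m / N + 1) + M * (m / N) := by
        have hdm := Nat.div_add_mod m N
        calc m = N * (m / N) + m % N := hdm.symm
          _ = (m % N + M) * (m / N) + m % N := by rw [← hM]
          _ = m % N * (m / N + 1) + M * (m / N) := by ring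
      rw [show pvChunkB (m / N) (m % N) m
          = pvChunkB (m / N) (m % N) (m % N * (m / N + 1) + M * (m / N)) by rw [← hm]]
      rw [show pvChunkA (m / N) (m % N) N
          = pvChunkA (m / N) (m % N) (m % N + M) by rw [← hM]]
      exact pvChunkEq (m / N) (m % N) M
    · -- n2 < 0 outside D_: n2 ≤ -n3, both sides are []
      push_neg at hn2
      have hle : n2 ≤ -(N : Int) := by
        unfold D_create_project_lecturers at hnD
        push_neg at hnD
        have h1 : (1 : Int) ≤ (N : Int) := by exact_mod_cast hN
        by_contra hc
        push_neg at hc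
        exact absurd hn2 (not_lt.mpr (hnD h1 hc))
      have hq : PySem.Int.truncdiv n2 (N : Int) ≤ -1 := by
        have ha : ((-n2).toNat : Int) = -n2 := Int.toNat_of_nonneg (by omega)
        set a := (-n2).toNat with hadef
        have haN : N ≤ a := by omega
        have h2 : n2 = -(a : Int) := by omega
        rw [h2]
        have : PySem.Int.truncdiv (-(a : Int)) (N : Int) = -((a / N : Nat) : Int) := by
          simp only [PySem.Int.truncdiv, Int.neg_tdiv]
          rw [← Int.ofNat_tdiv]
        rw [this]
        have : 1 ≤ a / N := (Nat.one_le_div_iff hN).mpr haN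
        omega
      have hA : create_project_lecturers n2 (N : Int) = [] := by
        rw [pvPortAChar]
        rw [List.flatMap_congr (g := fun _ : Nat => ([] : List Int)) (by
          intro i _
          split_ifs <;> · rw [Int.toNat_of_nonpos (by omega)]; exact List.replicate_zero)]
        simp
      have hB : create_project_lecturers_alt n2 (N : Int) = [] := by
        unfold create_project_lecturers_alt
        rw [if_neg (by exact_mod_cast Nat.not_le.mpr hN)]
        rw [PySem.List.pyRange_one_eq_nil (le_of_lt hn2)]
        rfl
      rw [hA, hB]

theorem create_project_lecturers_changed : Claim_changed_create_project_lecturers := by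
  unfold Claim_changed_create_project_lecturers; decide

theorem create_project_lecturers_tight : Claim_exact_create_project_lecturers := by
  intro n2 n3 _ _ hD
  unfold D_create_project_lecturers at hD
  obtain ⟨h1, h2, h3⟩ := hD
  obtain ⟨N, rfl⟩ : ∃ N : Nat, n3 = (N : Int) :=
    ⟨n3.toNat, (Int.toNat_of_nonneg (by omega)).symm⟩
  have hN : 0 < N := by exact_mod_cast lt_of_lt_of_le one_pos h1
  have hB : create_project_lecturers_alt n2 (N : Int) = [] := by
    unfold create_project_lecturers_alt
    rw [if_neg (by exact_mod_cast Nat.not_le.mpr hN)]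
    rw [PySem.List.pyRange_one_eq_nil (le_of_lt h3)]
    rfl
  have ha : ((-n2).toNat : Int) = -n2 := Int.toNat_of_nonneg (by omega)
  have hq : PySem.Int.truncdiv n2 (N : Int) = 0 := by
    have h4 : n2 = -(((-n2).toNat : Nat) : Int) := by omega
    rw [h4]
    simp only [PySem.Int.truncdiv, Int.neg_tdiv]
    rw [← Int.ofNat_tdiv]
    have : (-n2).toNat / N = 0 := Nat.div_eq_of_lt (by omega)
    rw [this]
    rfl
  have hr : 1 ≤ PySem.Int.mod n2 (N : Int) := by
    have h0 : 0 ≤ PySem.Int.mod n2 (N : Int) := PySem.Int.mod_nonneg n2 (by exact_mod_cast hN)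
    have hne : PySem.Int.mod n2 (N : Int) ≠ 0 := by
      intro hzero
      have hdvd : ((N : Int)) ∣ n2 := (PySem.Int.mod_eq_zero_iff_dvd n2 (N : Int)).mp hzero
      have : (N : Int) ≤ -n2 := Int.le_of_dvd (by omega) (dvd_neg.mpr hdvd)
      omega
    omega
  obtain ⟨K, rfl⟩ : ∃ K : Nat, N = K + 1 := ⟨N - 1, by omega⟩
  rw [hB, pvPortAChar]
  rw [List.range_succ_eq_map, List.flatMap_cons]
  rw [if_pos (by exact_mod_cast hr : ((0 : Nat) : Int) < PySem.Int.mod n2 ((K + 1 : Nat) : Int)), hq]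
  simp
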